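-- pv_equiv track=rewrite | github.com/paiml/depyler | examples/hard_wave3_034.py | is_subset_chars
-- ===== SOURCE A (Python) =====
-- from typing import Dict, List, Tuple
--
-- def char_frequency(s: str) -> Dict[str, int]:
--     """Build character frequency map."""
--     freq: Dict[str, int] = {}
--     i: int = 0
--     while i < len(s):
--         ch: str = s[i]
--         if ch in freq:
--             freq[ch] = freq[ch] + 1
--         else:
--             freq[ch] = 1
--         i += 1
--     return freq
--
-- def is_subset_chars(a: str, b: str) -> bool:
--     """Check if all chars of a appear in b with sufficient frequency."""
--     fa: Dict[str, int] = char_frequency(a)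
--     fb: Dict[str, int] = char_frequency(b)
--     for ch in fa:
--         if ch not in fb:
--             return False
--         if fa[ch] > fb[ch]:
--             return False
--     return True
-- ===== SOURCE B (Python) =====
-- def is_subset_chars(a: str, b: str) -> bool:
--     """Check if all chars of a appear in b with sufficient frequency."""
--     sa = sorted(a)
--     sb = sorted(b)
--     i = 0
--     j = 0
--     while i < len(sa):
--         if j >= len(sb):
--             return False
--         if sb[j] < sa[i]:
--             j += 1
--         elif sb[j] == sa[i]:
--             i += 1
--             j += 1
--         else:
--             return False
--     return True
-- ===== Notes on version B (the rewrite author's own statement) =====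
-- stated objective: alternative
-- what changed: Replaces A's frequency-dict construction and key-wise comparison by sort-then-merge: sort both strings and run a two-pointer greedy match of sorted(a) against sorted(b), returning False when a needed character is exhausted or overshot.
import Mathlib
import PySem

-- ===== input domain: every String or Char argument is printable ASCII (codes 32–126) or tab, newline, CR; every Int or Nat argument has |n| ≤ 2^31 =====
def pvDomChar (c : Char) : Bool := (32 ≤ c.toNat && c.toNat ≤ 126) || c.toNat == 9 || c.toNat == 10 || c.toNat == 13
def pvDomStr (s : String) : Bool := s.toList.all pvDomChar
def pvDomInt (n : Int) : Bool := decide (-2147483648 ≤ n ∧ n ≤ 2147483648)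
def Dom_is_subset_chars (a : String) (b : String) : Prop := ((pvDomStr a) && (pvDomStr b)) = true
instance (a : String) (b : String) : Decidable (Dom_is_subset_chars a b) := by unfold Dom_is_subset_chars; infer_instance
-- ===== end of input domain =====

-- B replaces A's frequency-dict-then-compare strategy by sort-then-merge: sort both
-- strings and greedily match sorted(a) against sorted(b) with two pointers (alternative
-- algorithm of similar cost; no speed claim).

-- ===== PORT A =====
-- while-loop over the characters of s in order, building the frequency dict;
-- 'freq[ch] = freq[ch] + 1' is exact here via getD because the branch guard is 'ch in freq'.
def char_frequency (s : String) : PySem.Dict Char Int :=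
  s.toList.foldl
    (fun freq ch =>
      if freq.contains ch then freq.insert ch (freq.getD ch 0 + 1)
      else freq.insert ch 1)
    PySem.Dict.empty

-- 'for ch in fa: …' with early returns; 'fa[ch]'/'fb[ch]' are exact via getD because
-- ch ranges over fa's keys and fb's membership was just checked.
def is_subset_chars_loop (fa fb : PySem.Dict Char Int) : List Char → Bool
  | [] => true
  | ch :: rest =>
    if fb.contains ch = false then false
    else if fa.getD ch 0 > fb.getD ch 0 then false
    else is_subset_chars_loop fa fb rest

def is_subset_chars (a : String) (b : String) : Bool :=
  let fa := char_frequency a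
  let fb := char_frequency b
  is_subset_chars_loop fa fb fa.keys

-- ===== PORT B =====
-- the two-pointer while loop of Source B: both index advances become structural descent
-- on the corresponding sorted list (i → consuming sa, j → consuming sb).
def merge_loop : List Char → List Char → Bool
  | [], _ => true
  | _ :: _, [] => false
  | x :: xs, y :: ys =>
    if y < x then merge_loop (x :: xs) ys
    else if y = x then merge_loop xs ys
    else false

def is_subset_chars_alt (a : String) (b : String) : Bool :=
  merge_loop (PySem.List.sorted a.toList (fun c => c) false)
             (PySem.List.sorted b.toList (fun c => c) false)

-- ===== PRECONDITION & SPEC =====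
def Spec_is_subset_chars (a : String) (b : String) (out : Bool) : Prop := out = is_subset_chars_alt a b
instance (a : String) (b : String) (out : Bool) : Decidable (Spec_is_subset_chars a b out) := by unfold Spec_is_subset_chars; infer_instance

-- ===== CLAIM (what is proved, stated in full; the proofs are below) =====
def Claim_equal_is_subset_chars : Prop := ∀ (a : String) (b : String), Dom_is_subset_chars a b → Spec_is_subset_chars a b (is_subset_chars a b)

-- ===== LEMMAS AND PROOFS =====

-- A's branched update is the standard counting update (the else-branch writes 1 = 0 + 1).
theorem char_frequency_eq_counter (s : String) :
    char_frequency s = PySem.Dict.counter s.toList := by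
  unfold char_frequency
  rw [← PySem.Dict.foldl_insert_getD_add_one_eq_counter]
  congr 1
  funext d ch
  by_cases h : d.contains ch = true
  · simp [h]
  · simp only [Bool.not_eq_true] at h
    simp [h, PySem.Dict.getD_of_not_contains d 0 h]

-- A's key loop, run on any sublist of a's distinct characters, is the count comparison.
theorem loop_eq_all (a b : String) (l : List Char) (hl : ∀ ch ∈ l, ch ∈ a.toList) :
    is_subset_chars_loop (PySem.Dict.counter a.toList) (PySem.Dict.counter b.toList) l
      = l.all (fun ch => a.toList.count ch ≤ b.toList.count ch) := by
  induction l with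
  | nil => rfl
  | cons ch rest ih =>
    have hmem : ch ∈ a.toList := hl ch (List.mem_cons_self)
    have ha : 0 < a.toList.count ch := List.count_pos_iff.mpr hmem
    simp only [is_subset_chars_loop, List.all_cons]
    by_cases hb : (PySem.Dict.counter b.toList).contains ch = true
    · have hbmem : ch ∈ b.toList := by
        have := PySem.Dict.contains_counter b.toList ch
        rw [hb] at this
        exact List.contains_iff_mem.mp this.symm
      simp only [hb, PySem.Dict.getD_counter]
      by_cases hc : a.toList.count ch ≤ b.toList.count ch
      · have : ¬ ((a.toList.count ch : Int) > (b.toList.count ch : Int)) := by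
          exact_mod_cast not_lt.mpr hc
        simp [this, hc, ih (fun x hx => hl x (List.mem_cons_of_mem _ hx))]
      · have : ((b.toList.count ch : Int) < (a.toList.count ch : Int)) := by
          exact_mod_cast not_le.mp hc
        simp [this, hc]
    · have hbmem : ch ∉ b.toList := by
        intro hmem'
        exact hb ((PySem.Dict.contains_counter b.toList ch).trans (List.contains_iff_mem.mpr hmem'))
      have hb0 : b.toList.count ch = 0 := List.count_eq_zero.mpr hbmem
      simp only [Bool.not_eq_true] at hb
      simp [hb, hb0, Nat.pos_iff_ne_zero.mp ha]

-- The greedy two-pointer merge on sorted lists decides count-wise inclusion.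
theorem merge_loop_iff (xs ys : List Char)
    (hxs : xs.Pairwise (· ≤ ·)) (hys : ys.Pairwise (· ≤ ·)) :
    merge_loop xs ys = true ↔ ∀ c ∈ xs, xs.count c ≤ ys.count c := by
  induction xs, ys using merge_loop.induct with
  | case1 ys => simp [merge_loop]
  | case2 x xs =>
    simp only [merge_loop, Bool.false_eq_true, false_iff]
    intro h
    have := h x List.mem_cons_self
    simp at this
  | case3 x xs y ys hlt ih =>
    have hxy : ∀ c ∈ x :: xs, y ≠ c := by
      intro c hc
      rcases List.mem_cons.mp hc with rfl | hc'
      · exact ne_of_lt hlt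
      · have : x ≤ c := (List.pairwise_cons.mp hxs).1 c hc'
        exact ne_of_lt (lt_of_lt_of_le hlt this)
    rw [merge_loop, if_pos hlt, ih hxs (List.Pairwise.of_cons hys)]
    constructor
    · intro h c hc
      calc (x :: xs).count c ≤ ys.count c := h c hc
        _ ≤ (y :: ys).count c := by rw [List.count_cons]; omega
    · intro h c hc
      have h1 := h c hc
      rwa [List.count_cons_of_ne (hxy c hc)] at h1
  | case4 xs x ys hnlt ih =>
    rw [merge_loop, if_neg hnlt, if_pos rfl,
        ih (List.Pairwise.of_cons hxs) (List.Pairwise.of_cons hys)]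
    constructor
    · intro h c hc
      rcases List.mem_cons.mp hc with rfl | hc'
      · rw [List.count_cons_self, List.count_cons_self]
        by_cases hx : c ∈ xs
        · have := h c hx; omega
        · have : xs.count c = 0 := List.count_eq_zero.mpr hx
          omega
      · by_cases hcx : c = x
        · subst hcx
          rw [List.count_cons_self, List.count_cons_self]
          have := h c hc'; omega
        · rw [List.count_cons_of_ne (Ne.symm hcx), List.count_cons_of_ne (Ne.symm hcx)]
          exact h c hc'
    · intro h c hc
      have h1 := h c (List.mem_cons_of_mem _ hc)
      by_cases hcx : c = x
      · subst hcx
        rw [List.count_cons_self, List.count_cons_self] at h1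
        omega
      · rwa [List.count_cons_of_ne (Ne.symm hcx), List.count_cons_of_ne (Ne.symm hcx)] at h1
  | case5 x xs y ys hnlt hne =>
    have hxy : x < y := lt_of_le_of_ne (not_lt.mp hnlt) (fun h => hne h.symm)
    simp only [merge_loop, if_neg hnlt, if_neg hne, Bool.false_eq_true, false_iff]
    intro h
    have hx : x ∉ y :: ys := by
      intro hmem
      rcases List.mem_cons.mp hmem with rfl | hmem'
      · exact absurd hxy (lt_irrefl x)
      · have : y ≤ x := (List.pairwise_cons.mp hys).1 x hmem'
        exact absurd hxy (not_lt.mpr this)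
    have h1 := h x List.mem_cons_self
    rw [List.count_eq_zero.mpr hx] at h1
    simp at h1

-- A as a count-wise proposition.
theorem portA_iff (a b : String) :
    is_subset_chars a b = true ↔ ∀ c ∈ a.toList, a.toList.count c ≤ b.toList.count c := by
  unfold is_subset_chars
  simp only [char_frequency_eq_counter, PySem.Dict.keys_counter]
  rw [loop_eq_all a b _ (fun ch hch => (PySem.Set.mem_ofList a.toList ch).mp hch)]
  simp only [List.all_eq_true, decide_eq_true_eq]
  constructor
  · intro h c hc
    exact h c ((PySem.Set.mem_ofList a.toList c).mpr hc)
  · intro h c hc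
    exact h c ((PySem.Set.mem_ofList a.toList c).mp hc)

-- B as the same count-wise proposition (sorting permutes, so counts and membership agree).
theorem portB_iff (a b : String) :
    is_subset_chars_alt a b = true ↔ ∀ c ∈ a.toList, a.toList.count c ≤ b.toList.count c := by
  unfold is_subset_chars_alt
  have pa := PySem.List.sorted_perm a.toList (fun c => c) false
  have pb := PySem.List.sorted_perm b.toList (fun c => c) false
  rw [merge_loop_iff _ _ (PySem.List.sorted_pairwise a.toList (fun c => c))
        (PySem.List.sorted_pairwise b.toList (fun c => c))]
  constructor
  · intro h c hc
    have := h c (pa.mem_iff.mpr hc)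
    rwa [pa.count_eq, pb.count_eq] at this
  · intro h c hc
    rw [pa.count_eq, pb.count_eq]
    exact h c (pa.mem_iff.mp hc)

-- ===== VERDICT (by name: the statement is the Claim_ definition above) =====
theorem is_subset_chars_spec : Claim_equal_is_subset_chars := by
  intro a b _
  unfold Spec_is_subset_chars
  exact Bool.eq_iff_iff.mpr ((portA_iff a b).trans (portB_iff a b).symm)
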